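-- pv_equiv track=rewrite | github.com/mitchellnel/technical-interview-prep | algoexpert/medium/minimumPassesOfMatrix.py | flip_negatives
-- ===== SOURCE A (Python) =====
-- def flip_negatives(matrix):
--     passes = 0
--
--     current_pass_queue = []
--     next_pass_queue = get_positive_positions(matrix)
--
--     while len(next_pass_queue) > 0:
--         current_pass_queue = next_pass_queue
--         next_pass_queue = []
--
--         while len(current_pass_queue) > 0:
--             curr = current_pass_queue.pop(0)
--
--             r, c = curr
--             neighbours = get_neighbours(matrix, r, c)
--
--             for neighbour in neighbours:
--                 nei_r, nei_c = neighbour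
--                 if matrix[nei_r][nei_c] < 0:
--                     matrix[nei_r][nei_c] *= -1
--                     next_pass_queue.append((nei_r, nei_c))
--
--         passes += 1
--
--     return passes
--
-- def get_positive_positions(matrix):
--     positions = []
--
--     for r in range(len(matrix)):
--         for c in range(len(matrix[r])):
--             if matrix[r][c] > 0:
--                 positions.append((r, c))
--
--     return positions
--
-- def get_neighbours(matrix, row, col):
--     neighbours = []
--
--     num_rows = len(matrix)
--     num_cols = len(matrix[row])
--
--     if row - 1 >= 0:
--         neighbours.append((row - 1, col))
--     if row + 1 < num_rows:
--         neighbours.append((row + 1, col))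
--     if col - 1 >= 0:
--         neighbours.append((row, col - 1))
--     if col + 1 < num_cols:
--         neighbours.append((row, col + 1))
--
--     return neighbours
-- ===== SOURCE B (Python) =====
-- def flip_negatives(matrix):
--     # Fixed-point sweep instead of BFS queues: each round scans the whole
--     # matrix once and simultaneously flips every negative cell that has a
--     # positive neighbour; rounds are counted.  Mutates matrix in place like A.
--     if not any(v > 0 for row in matrix for v in row):
--         return 0
--     passes = 1
--     while True:
--         flips = [(r, c)
--                  for r in range(len(matrix))
--                  for c in range(len(matrix[r]))
--                  if matrix[r][c] < 0 and has_positive_neighbour(matrix, r, c)]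
--         if not flips:
--             return passes
--         for r, c in flips:
--             matrix[r][c] = -matrix[r][c]
--         passes += 1
--
-- def has_positive_neighbour(matrix, r, c):
--     for nr, nc in ((r - 1, c), (r + 1, c), (r, c - 1), (r, c + 1)):
--         if 0 <= nr < len(matrix) and 0 <= nc < len(matrix[nr]) and matrix[nr][nc] > 0:
--             return True
--     return False
-- ===== Notes on version B (the rewrite author's own statement) =====
-- stated objective: alternative
-- what changed: The two-queue layered BFS with per-cell pop(0)/neighbour expansion is replaced by whole-matrix fixed-point sweeps: each round scans the matrix once and simultaneously flips every negative cell that has a positive neighbour, counting rounds until no flip happens; no queues are kept, at the price of one full scan per round.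
-- outside the precondition, e.g. on flip_negatives([[0, 9], [0, 0], [0]]): A returns 1, B returns 1
import Mathlib
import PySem

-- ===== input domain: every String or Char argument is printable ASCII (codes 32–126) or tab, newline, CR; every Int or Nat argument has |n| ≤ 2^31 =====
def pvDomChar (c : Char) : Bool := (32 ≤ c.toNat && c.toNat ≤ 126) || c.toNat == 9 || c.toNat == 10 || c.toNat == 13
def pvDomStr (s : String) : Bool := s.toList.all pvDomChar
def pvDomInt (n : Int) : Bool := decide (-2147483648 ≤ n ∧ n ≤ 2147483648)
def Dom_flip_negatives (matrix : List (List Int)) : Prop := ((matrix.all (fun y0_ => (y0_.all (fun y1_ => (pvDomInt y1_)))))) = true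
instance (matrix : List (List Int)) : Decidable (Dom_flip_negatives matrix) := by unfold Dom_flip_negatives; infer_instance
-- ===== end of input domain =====

-- B replaces A's two-queue layered BFS by whole-matrix simultaneous-flip sweeps
-- (objective: alternative decomposition, not speed).  Both Pythons flip the same
-- matrix cells in place; the equivalence proved here is about the return value.

-- ===== PORT A =====
-- Cell read/write helpers: Python's matrix[r][c] read and write.  In A every
-- executed index is a nonnegative in-range int (guards in get_neighbours, and the
-- flip branch only fires on a stored negative value), so Nat indices with getD /
-- List.set (out-of-range ⇒ default 0 / no-op, never reached under Pre_) are exact.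
def pvGet (m : List (List Int)) (r c : Nat) : Int := (m.getD r []).getD c 0

def pvSet (m : List (List Int)) (r c : Nat) (v : Int) : List (List Int) :=
  m.set r ((m.getD r []).set c v)

-- number of negative cells: the termination measure of both while-loops
def pvNegCount (m : List (List Int)) : Nat :=
  (m.map (fun row => row.countP (fun v => decide (v < 0)))).sum

-- a cell that reads negative is in bounds (out-of-range reads give 0)
theorem pvGet_neg_bounds {m : List (List Int)} {r c : Nat} (h : pvGet m r c < 0) :
    r < m.length ∧ c < (m.getD r []).length := by
  unfold pvGet at h
  constructor
  · by_contra hr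
    have hrow : m.getD r [] = [] := by
      rw [List.getD_eq_getElem?_getD, List.getElem?_eq_none (by omega : m.length ≤ r)]
      rfl
    rw [hrow, List.getD_nil] at h
    omega
  · by_contra hc
    have : (m.getD r []).getD c 0 = 0 := by
      rw [List.getD_eq_getElem?_getD,
        List.getElem?_eq_none (by omega : (m.getD r []).length ≤ c)]
      rfl
    omega

theorem pvCountP_set (l : List Int) (c : Nat) (v : Int) (p : Int → Bool) (hc : c < l.length) :
    (l.set c v).countP p + (if p (l.getD c 0) then 1 else 0)
      = l.countP p + (if p v then 1 else 0) := by
  induction l generalizing c with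
  | nil => simp at hc
  | cons a t ih =>
    cases c with
    | zero => simp [List.countP_cons]; split_ifs <;> simp
    | succ c =>
      have := ih c (by simpa using hc)
      simp only [List.set_cons_succ, List.countP_cons, List.getD_cons_succ]
      omega

theorem pvNegCount_set (m : List (List Int)) (r : Nat) (row : List Int) (hr : r < m.length) :
    pvNegCount (m.set r row) + (m.getD r []).countP (fun v => decide (v < 0))
      = pvNegCount m + row.countP (fun v => decide (v < 0)) := by
  induction m generalizing r with
  | nil => simp at hr
  | cons a t ih =>
    cases r with
    | zero => simp [pvNegCount]; omega
    | succ r =>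
      have := ih r (by simpa using hr)
      simp only [List.set_cons_succ, pvNegCount, List.map_cons, List.sum_cons,
        List.getD_cons_succ] at *
      omega

theorem pvNegCount_pvSet {m : List (List Int)} {r c : Nat} {v : Int}
    (h : pvGet m r c < 0) (hv : 0 ≤ v) :
    pvNegCount (pvSet m r c v) + 1 = pvNegCount m := by
  obtain ⟨hr, hc⟩ := pvGet_neg_bounds h
  have h1 := pvNegCount_set m r ((m.getD r []).set c v) hr
  have h2 := pvCountP_set (m.getD r []) c v (fun v => decide (v < 0)) hc
  unfold pvGet at h
  simp only [decide_eq_true_eq] at h1 h2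
  rw [if_pos h, if_neg (by omega)] at h2
  unfold pvSet
  omega

-- reading after writing one cell (write known to be in bounds)
theorem pvGet_pvSet {m : List (List Int)} {r c : Nat} (v : Int) (r' c' : Nat)
    (hr : r < m.length) (hc : c < (m.getD r []).length) :
    pvGet (pvSet m r c v) r' c' = if r = r' ∧ c = c' then v else pvGet m r' c' := by
  unfold pvGet pvSet
  simp only [List.getD_eq_getElem?_getD] at hc ⊢
  by_cases h : r = r'
  · subst h
    rw [List.getElem?_set_self (by omega), Option.getD_some]
    by_cases h2 : c = c'
    · subst h2
      rw [List.getElem?_set_self hc]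
      simp
    · rw [List.getElem?_set_ne (by omega : c ≠ c')]
      simp [h2]
  · rw [List.getElem?_set_ne (by omega : r ≠ r')]
    simp [h]

def get_positive_positions (m : List (List Int)) : List (Nat × Nat) :=
  (List.range m.length).foldl (fun ps r =>
    (List.range (m.getD r []).length).foldl (fun ps c =>
      if 0 < pvGet m r c then ps ++ [(r, c)] else ps) ps) []

def get_neighbours (m : List (List Int)) (row col : Nat) : List (Nat × Nat) :=
  (if 1 ≤ row then [(row - 1, col)] else []) ++
  (if row + 1 < m.length then [(row + 1, col)] else []) ++
  (if 1 ≤ col then [(row, col - 1)] else []) ++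
  (if col + 1 < (m.getD row []).length then [(row, col + 1)] else [])

-- body of the 'for neighbour in neighbours' loop: flip a negative cell, enqueue it
def pvFlipStep (st : List (List Int) × List (Nat × Nat)) (nb : Nat × Nat) :
    List (List Int) × List (Nat × Nat) :=
  if pvGet st.1 nb.1 nb.2 < 0 then
    (pvSet st.1 nb.1 nb.2 (pvGet st.1 nb.1 nb.2 * -1), st.2 ++ [nb])
  else st

-- inner 'while len(current_pass_queue) > 0' loop (pop(0), expand neighbours)
def pvInner : List (List Int) → List (Nat × Nat) → List (Nat × Nat) →
    List (List Int) × List (Nat × Nat)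
  | m, [], nq => (m, nq)
  | m, (r, c) :: q, nq =>
    let st := (get_neighbours m r c).foldl pvFlipStep (m, nq)
    pvInner st.1 q st.2

theorem pvFoldFlip_count (ns : List (Nat × Nat)) (m : List (List Int)) (nq : List (Nat × Nat)) :
    pvNegCount ((ns.foldl pvFlipStep (m, nq)).1) + ((ns.foldl pvFlipStep (m, nq)).2).length
      = pvNegCount m + nq.length := by
  induction ns generalizing m nq with
  | nil => rfl
  | cons nb ns ih =>
    simp only [List.foldl_cons]
    by_cases h : pvGet m nb.1 nb.2 < 0
    · rw [show pvFlipStep (m, nq) nb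
        = (pvSet m nb.1 nb.2 (pvGet m nb.1 nb.2 * -1), nq ++ [nb]) by simp [pvFlipStep, h]]
      have := ih (pvSet m nb.1 nb.2 (pvGet m nb.1 nb.2 * -1)) (nq ++ [nb])
      have hdec := pvNegCount_pvSet h (by nlinarith : (0:Int) ≤ pvGet m nb.1 nb.2 * -1)
      simp only [List.length_append, List.length_cons, List.length_nil] at *
      omega
    · rw [show pvFlipStep (m, nq) nb = (m, nq) by simp [pvFlipStep, h]]
      exact ih m nq

theorem pvInner_count (q : List (Nat × Nat)) (m : List (List Int)) (nq : List (Nat × Nat)) :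
    pvNegCount ((pvInner m q nq).1) + ((pvInner m q nq).2).length = pvNegCount m + nq.length := by
  induction q generalizing m nq with
  | nil => rfl
  | cons p q ih =>
    obtain ⟨r, c⟩ := p
    simp only [pvInner]
    have h1 := pvFoldFlip_count (get_neighbours m r c) m nq
    have h2 := ih ((get_neighbours m r c).foldl pvFlipStep (m, nq)).1
      ((get_neighbours m r c).foldl pvFlipStep (m, nq)).2
    omega

-- outer 'while len(next_pass_queue) > 0' loop
def pvOuter (m : List (List Int)) (nq : List (Nat × Nat)) (passes : Int) : Int :=
  if nq = [] then passes
  else pvOuter (pvInner m nq []).1 (pvInner m nq []).2 (passes + 1)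
termination_by 2 * pvNegCount m + (if nq = [] then 0 else 1)
decreasing_by
  have h := pvInner_count nq m []
  rcases List.eq_nil_or_concat ((pvInner m nq []).2) with h2 | ⟨l, x, h2⟩ <;>
    simp only [h2, List.length_nil, List.length_append, List.length_cons] at h ⊢ <;>
    simp_all <;> omega

def flip_negatives (matrix : List (List Int)) : Int :=
  pvOuter matrix (get_positive_positions matrix) 0

-- ===== PORT B =====
-- '0 <= nr < len(matrix) and 0 <= nc < len(matrix[nr]) and matrix[nr][nc] > 0'
-- (Nat indices: 0 <= is automatic; the r-1/c-1 candidates carry the 1 ≤ guard)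
def pvOk (m : List (List Int)) (nr nc : Nat) : Bool :=
  decide (nr < m.length) && decide (nc < (m.getD nr []).length)
    && decide (0 < (m.getD nr []).getD nc 0)

def has_positive_neighbour (m : List (List Int)) (r c : Nat) : Bool :=
  (decide (1 ≤ r) && pvOk m (r - 1) c) || pvOk m (r + 1) c
    || (decide (1 ≤ c) && pvOk m r (c - 1)) || pvOk m r (c + 1)

-- the list comprehension collecting this round's flips (row-major)
def pvFlips (m : List (List Int)) : List (Nat × Nat) :=
  (List.range m.length).flatMap (fun r =>
    (List.range (m.getD r []).length).filterMap (fun c =>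
      if (m.getD r []).getD c 0 < 0 && has_positive_neighbour m r c then some (r, c)
      else none))

-- 'for r, c in flips: matrix[r][c] = -matrix[r][c]'
def pvApplyFlips (m : List (List Int)) (fs : List (Nat × Nat)) : List (List Int) :=
  fs.foldl (fun m p => m.set p.1 ((m.getD p.1 []).set p.2 (-((m.getD p.1 []).getD p.2 0)))) m

theorem pvFlips_mem {m : List (List Int)} {x : Nat × Nat} :
    x ∈ pvFlips m ↔ x.1 < m.length ∧ x.2 < (m.getD x.1 []).length ∧
      pvGet m x.1 x.2 < 0 ∧ has_positive_neighbour m x.1 x.2 = true := by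
  obtain ⟨r, c⟩ := x
  simp only [pvFlips, List.mem_flatMap, List.mem_filterMap, List.mem_range]
  constructor
  · rintro ⟨r', hr', c', hc', h⟩
    split_ifs at h with hcond
    rw [Option.some.injEq, Prod.mk.injEq] at h
    obtain ⟨rfl, rfl⟩ := h
    simp only [Bool.and_eq_true, decide_eq_true_eq] at hcond
    exact ⟨hr', hc', hcond.1, hcond.2⟩
  · rintro ⟨h1, h2, h3, h4⟩
    refine ⟨r, h1, c, h2, ?_⟩
    rw [if_pos]
    simp only [Bool.and_eq_true, decide_eq_true_eq]
    exact ⟨h3, h4⟩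

theorem pvFlips_nodup (m : List (List Int)) : (pvFlips m).Nodup := by
  unfold pvFlips
  rw [List.nodup_flatMap]
  constructor
  · intro r _
    apply List.Nodup.filterMap _ (List.nodup_range)
    intro c c' b h h'
    simp only [Option.mem_def] at h h'
    split_ifs at h h' <;> simp_all [Prod.ext_iff]
  · apply List.Pairwise.imp _ (List.nodup_range (n := m.length))
    intro r r' hne
    simp only [Function.onFun, List.disjoint_left]
    intro x hx hx'
    simp only [List.mem_filterMap] at hx hx'
    obtain ⟨c, _, h⟩ := hx
    obtain ⟨c', _, h'⟩ := hx'
    split_ifs at h h' <;> simp_all [Prod.ext_iff]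

theorem pvApplyFlips_count (fs : List (Nat × Nat)) (m : List (List Int))
    (hnd : fs.Nodup) (hneg : ∀ x ∈ fs, pvGet m x.1 x.2 < 0) :
    pvNegCount (pvApplyFlips m fs) + fs.length = pvNegCount m := by
  induction fs generalizing m with
  | nil => rfl
  | cons y fs ih =>
    have hy := hneg y (List.mem_cons_self ..)
    obtain ⟨hr, hc⟩ := pvGet_neg_bounds hy
    have hstep : (m.set y.1 ((m.getD y.1 []).set y.2 (-((m.getD y.1 []).getD y.2 0))))
        = pvSet m y.1 y.2 (-(pvGet m y.1 y.2)) := rfl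
    simp only [pvApplyFlips, List.foldl_cons] at *
    rw [hstep]
    have hdec := pvNegCount_pvSet hy (by omega : (0:Int) ≤ -(pvGet m y.1 y.2))
    have hrest := ih (pvSet m y.1 y.2 (-(pvGet m y.1 y.2))) (List.Nodup.of_cons hnd)
      (by
        intro x hx
        have hxy : x ≠ y := fun h => (List.nodup_cons.1 hnd).1 (h ▸ hx)
        rw [pvGet_pvSet _ x.1 x.2 hr hc]
        rw [if_neg (by
          rintro ⟨h1, h2⟩
          exact hxy (Prod.ext h1.symm h2.symm))]
        exact hneg x (List.mem_cons_of_mem _ hx))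
    simp only [List.length_cons]
    unfold pvApplyFlips at hrest
    omega

-- 'while True' sweep loop of B
def pvLoop (m : List (List Int)) (passes : Int) : Int :=
  if pvFlips m = [] then passes
  else pvLoop (pvApplyFlips m (pvFlips m)) (passes + 1)
termination_by pvNegCount m
decreasing_by
  have h := pvApplyFlips_count (pvFlips m) m (pvFlips_nodup m)
    (fun x hx => (pvFlips_mem.1 hx).2.2.1)
  have : (pvFlips m).length ≠ 0 := by simpa using ‹¬pvFlips m = []›
  omega

def flip_negatives_alt (matrix : List (List Int)) : Int :=
  if matrix.any (fun row => row.any (fun v => 0 < v)) then pvLoop matrix 1 else 0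

-- ===== PRECONDITION & SPEC =====
-- Pre_ admits exactly the rectangular matrices: on ragged input A indexes a row
-- with a column bound taken from another row and raises IndexError whenever the
-- scan reaches a missing cell (e.g. [[1],[2,3]]); on the rare ragged inputs where
-- A happens to complete, B returns the same value (see claim cites).
def Pre_flip_negatives (matrix : List (List Int)) : Prop :=
  ∀ row ∈ matrix, row.length = (matrix.headD []).length

instance (matrix : List (List Int)) : Decidable (Pre_flip_negatives matrix) := by
  unfold Pre_flip_negatives; infer_instance

def pvWitness_flip_negatives : List (List Int) := [[1, -2], [-3, 0]]

def Spec_flip_negatives (matrix : List (List Int)) (out : Int) : Prop :=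
  out = flip_negatives_alt matrix
instance (matrix : List (List Int)) (out : Int) : Decidable (Spec_flip_negatives matrix out) := by
  unfold Spec_flip_negatives; infer_instance

-- ===== CLAIM (what is proved, stated in full; the proofs are below) =====
def Claim_equal_flip_negatives : Prop := ∀ (matrix : List (List Int)),
  Dom_flip_negatives matrix → Pre_flip_negatives matrix →
    Spec_flip_negatives matrix (flip_negatives matrix)

-- ===== LEMMAS AND PROOFS =====

def InB (m : List (List Int)) (x : Nat × Nat) : Prop :=
  x.1 < m.length ∧ x.2 < (m.getD x.1 []).length

def Orth (x y : Nat × Nat) : Prop :=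
  (x.2 = y.2 ∧ (y.1 = x.1 + 1 ∨ x.1 = y.1 + 1)) ∨
  (x.1 = y.1 ∧ (y.2 = x.2 + 1 ∨ x.2 = y.2 + 1))

def Rect (m : List (List Int)) : Prop :=
  ∀ i, i < m.length → (m.getD i []).length = (m.headD []).length

def SameShape (m1 m2 : List (List Int)) : Prop :=
  m1.length = m2.length ∧ ∀ i, (m1.getD i []).length = (m2.getD i []).length

-- A's flip set for a round started with queue q
abbrev FlipA (m : List (List Int)) (q : List (Nat × Nat)) (x : Nat × Nat) : Prop :=
  pvGet m x.1 x.2 < 0 ∧ ∃ p ∈ q, x ∈ get_neighbours m p.1 p.2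

-- the loop invariant relating A's queue to the matrix
def QInv (m : List (List Int)) (q : List (Nat × Nat)) : Prop :=
  (∀ p ∈ q, InB m p ∧ 0 < pvGet m p.1 p.2) ∧
  (∀ x y, InB m x → pvGet m x.1 x.2 < 0 → InB m y → Orth x y →
    0 < pvGet m y.1 y.2 → y ∈ q)

theorem orth_symm {x y : Nat × Nat} : Orth x y ↔ Orth y x := by unfold Orth; omega

theorem pre_rect {m : List (List Int)} (h : Pre_flip_negatives m) : Rect m := by
  intro i hi
  rw [List.getD_eq_getElem?_getD, List.getElem?_eq_getElem hi]
  exact h _ (List.getElem_mem hi)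

theorem headD_eq_getD (l : List (List Int)) : l.headD [] = l.getD 0 [] := by
  cases l <;> rfl

theorem rect_of_sameShape {m1 m2 : List (List Int)} (hs : SameShape m1 m2) (h : Rect m2) :
    Rect m1 := by
  intro i hi
  rw [headD_eq_getD, hs.2 i, hs.2 0, ← headD_eq_getD]
  exact h i (hs.1 ▸ hi)

theorem sameShape_refl (m : List (List Int)) : SameShape m m := ⟨rfl, fun _ => rfl⟩

theorem sameShape_trans {m1 m2 m3 : List (List Int)}
    (h1 : SameShape m1 m2) (h2 : SameShape m2 m3) : SameShape m1 m3 :=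
  ⟨h1.1.trans h2.1, fun i => (h1.2 i).trans (h2.2 i)⟩

theorem sameShape_symm {m1 m2 : List (List Int)} (h : SameShape m1 m2) : SameShape m2 m1 :=
  ⟨h.1.symm, fun i => (h.2 i).symm⟩

theorem sameShape_pvSet {m : List (List Int)} {r c : Nat} {v : Int}
    (hr : r < m.length) (_hc : c < (m.getD r []).length) :
    SameShape (pvSet m r c v) m := by
  constructor
  · simp [pvSet]
  · intro i
    unfold pvSet
    by_cases h : r = i
    · subst h
      simp [List.getD_eq_getElem?_getD, List.getElem?_set_self (by omega : r < m.length)]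
    · simp [List.getD_eq_getElem?_getD, List.getElem?_set_ne (by omega : r ≠ i)]

theorem get_neighbours_shape {m1 m2 : List (List Int)} (h : SameShape m1 m2) (r c : Nat) :
    get_neighbours m1 r c = get_neighbours m2 r c := by
  unfold get_neighbours; rw [h.1, h.2 r]

theorem row_getD_eq {m : List (List Int)} {i : Nat} (h : i < m.length) :
    m.getD i [] = m[i] := by
  rw [List.getD_eq_getElem?_getD, List.getElem?_eq_getElem h, Option.getD_some]

theorem pvGet_eq_getElem {m : List (List Int)} {i j : Nat}
    (h1 : i < m.length) (h2 : j < m[i].length) : pvGet m i j = m[i][j] := by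
  unfold pvGet
  rw [row_getD_eq h1, List.getD_eq_getElem?_getD, List.getElem?_eq_getElem h2,
    Option.getD_some]

theorem shape_ext {m1 m2 : List (List Int)} (h : SameShape m1 m2)
    (hval : ∀ r c, pvGet m1 r c = pvGet m2 r c) : m1 = m2 := by
  apply List.ext_getElem h.1
  intro i h1 h2
  have hlen : m1[i].length = m2[i].length := by
    have := h.2 i
    rwa [row_getD_eq h1, row_getD_eq h2] at this
  apply List.ext_getElem hlen
  intro j hj1 hj2
  have := hval i j
  rwa [pvGet_eq_getElem h1 hj1, pvGet_eq_getElem h2 hj2] at this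

-- generic membership through an accumulate-fold
theorem mem_foldl_of_step {α β : Type} (l : List α) (acc : List β)
    (g : List β → α → List β) (P : α → β → Prop)
    (hg : ∀ ps a x, x ∈ g ps a ↔ x ∈ ps ∨ P a x) (x : β) :
    x ∈ l.foldl g acc ↔ x ∈ acc ∨ ∃ a ∈ l, P a x := by
  induction l generalizing acc with
  | nil => simp
  | cons a l ih =>
    rw [List.foldl_cons, ih (g acc a)]
    simp only [List.mem_cons, hg]
    constructor
    · rintro ((h | h) | ⟨a', h1, h2⟩)
      · exact Or.inl h
      · exact Or.inr ⟨a, Or.inl rfl, h⟩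
      · exact Or.inr ⟨a', Or.inr h1, h2⟩
    · rintro (h | ⟨a', (h1 | h1), h2⟩)
      · exact Or.inl (Or.inl h)
      · exact Or.inl (Or.inr (h1 ▸ h2))
      · exact Or.inr ⟨a', h1, h2⟩

theorem sources_mem {m : List (List Int)} {x : Nat × Nat} :
    x ∈ get_positive_positions m ↔ InB m x ∧ 0 < pvGet m x.1 x.2 := by
  unfold get_positive_positions
  rw [mem_foldl_of_step _ _ _
    (fun r x => ∃ c ∈ List.range (m.getD r []).length, 0 < pvGet m r c ∧ x = (r, c))
    (fun ps r x => by
      rw [mem_foldl_of_step _ _ _ (fun c x => 0 < pvGet m r c ∧ x = (r, c))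
        (fun ps c x => by split_ifs with h <;> simp [h])])]
  simp only [List.not_mem_nil, false_or, List.mem_range]
  constructor
  · rintro ⟨r, hr, c, hc, hpos, rfl⟩
    exact ⟨⟨hr, hc⟩, hpos⟩
  · rintro ⟨⟨h1, h2⟩, hpos⟩
    exact ⟨x.1, h1, x.2, h2, hpos, rfl⟩

theorem any_pos_iff (m : List (List Int)) :
    (m.any (fun row => row.any (fun v => 0 < v)) = true) ↔
      ∃ x : Nat × Nat, InB m x ∧ 0 < pvGet m x.1 x.2 := by
  simp only [List.any_eq_true, decide_eq_true_eq, List.mem_iff_getElem]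
  constructor
  · rintro ⟨row, ⟨i, hi, rfl⟩, v, ⟨j, hj, rfl⟩, hpos⟩
    refine ⟨(i, j), ⟨hi, ?_⟩, ?_⟩
    · rwa [row_getD_eq hi]
    · rwa [pvGet_eq_getElem hi hj]
  · rintro ⟨⟨i, j⟩, ⟨h1, h2⟩, hpos⟩
    rw [row_getD_eq h1] at h2
    exact ⟨m[i], ⟨i, h1, rfl⟩, m[i][j], ⟨j, h2, rfl⟩, by rwa [pvGet_eq_getElem h1 h2] at hpos⟩

theorem mem_get_neighbours {m : List (List Int)} {p x : Nat × Nat}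
    (hR : Rect m) (hp : InB m p) :
    x ∈ get_neighbours m p.1 p.2 ↔ InB m x ∧ Orth p x := by
  obtain ⟨pr, pc⟩ := p
  obtain ⟨xr, xc⟩ := x
  obtain ⟨hp1, hp2⟩ := hp
  simp only [InB] at *
  have hmem : ∀ (cond : Prop) (_ : Decidable cond) (y : Nat × Nat),
      ((xr, xc) ∈ if cond then [y] else ([] : List (Nat × Nat))) ↔ cond ∧ (xr, xc) = y := by
    intro cond _ y
    split_ifs with h <;> simp [h]
  simp only [get_neighbours, List.mem_append, hmem, Prod.mk.injEq]
  constructor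
  · rintro (((⟨h, rfl, rfl⟩ | ⟨h, rfl, rfl⟩) | ⟨h, rfl, rfl⟩) | ⟨h, rfl, rfl⟩)
    · refine ⟨⟨by omega, ?_⟩, Or.inl ⟨rfl, by omega⟩⟩
      rw [hR _ (by omega : pr - 1 < m.length), ← hR _ hp1]
      exact hp2
    · refine ⟨⟨by omega, ?_⟩, Or.inl ⟨rfl, by omega⟩⟩
      rw [hR _ (by omega : pr + 1 < m.length), ← hR _ hp1]
      exact hp2
    · exact ⟨⟨hp1, by omega⟩, Or.inr ⟨rfl, by omega⟩⟩
    · exact ⟨⟨hp1, by omega⟩, Or.inr ⟨rfl, by omega⟩⟩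
  · rintro ⟨⟨hx1, hx2⟩, (⟨rfl, h | h⟩ | ⟨rfl, h | h⟩)⟩
    · exact Or.inl (Or.inl (Or.inr ⟨by omega, by omega, rfl⟩))
    · exact Or.inl (Or.inl (Or.inl ⟨by omega, by omega, rfl⟩))
    · refine Or.inr ⟨?_, rfl, by omega⟩
      rw [hR _ hp1, ← hR _ hx1]
      omega
    · exact Or.inl (Or.inr ⟨by omega, rfl, by omega⟩)

theorem hasPos_iff {m : List (List Int)} {r c : Nat} :
    has_positive_neighbour m r c = true ↔
      ∃ y, InB m y ∧ Orth (r, c) y ∧ 0 < pvGet m y.1 y.2 := by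
  simp only [has_positive_neighbour, pvOk, Bool.or_eq_true, Bool.and_eq_true,
    decide_eq_true_eq, InB, Orth, Prod.exists, pvGet]
  constructor
  · rintro (((⟨h0, ⟨h1, h2⟩, h3⟩ | ⟨⟨h1, h2⟩, h3⟩) | ⟨h0, ⟨h1, h2⟩, h3⟩) | ⟨⟨h1, h2⟩, h3⟩)
    · exact ⟨r - 1, c, ⟨h1, h2⟩, Or.inl ⟨rfl, Or.inr (by omega)⟩, h3⟩
    · exact ⟨r + 1, c, ⟨h1, h2⟩, Or.inl ⟨rfl, Or.inl rfl⟩, h3⟩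
    · exact ⟨r, c - 1, ⟨h1, h2⟩, Or.inr ⟨rfl, Or.inr (by omega)⟩, h3⟩
    · exact ⟨r, c + 1, ⟨h1, h2⟩, Or.inr ⟨rfl, Or.inl rfl⟩, h3⟩
  · rintro ⟨yr, yc, ⟨h1, h2⟩, (⟨heq, h | h⟩ | ⟨heq, h | h⟩), h3⟩
    · subst heq; subst h
      exact Or.inl (Or.inl (Or.inr ⟨⟨h1, h2⟩, h3⟩))
    · subst heq
      refine Or.inl (Or.inl (Or.inl ⟨by omega, ⟨?_, ?_⟩, ?_⟩)) <;>
        (first | assumption | (rw [show r - 1 = yr by omega]; assumption))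
    · subst heq; subst h
      exact Or.inr ⟨⟨h1, h2⟩, h3⟩
    · subst heq
      refine Or.inl (Or.inr ⟨by omega, ⟨?_, ?_⟩, ?_⟩) <;>
        (first | assumption | (rw [show c - 1 = yc by omega]; assumption))

-- characterisation of the neighbour fold of A's inner loop
theorem pvFoldFlip_char (ns : List (Nat × Nat)) (m : List (List Int)) (nq : List (Nat × Nat)) :
    SameShape ((ns.foldl pvFlipStep (m, nq)).1) m ∧
    (∀ r c, pvGet ((ns.foldl pvFlipStep (m, nq)).1) r c
      = if pvGet m r c < 0 ∧ (r, c) ∈ ns then pvGet m r c * -1 else pvGet m r c) ∧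
    (∀ x, x ∈ (ns.foldl pvFlipStep (m, nq)).2 ↔ x ∈ nq ∨ (pvGet m x.1 x.2 < 0 ∧ x ∈ ns)) := by
  induction ns generalizing m nq with
  | nil =>
    refine ⟨sameShape_refl m, fun r c => ?_, fun x => ?_⟩ <;> simp
  | cons nb ns ih =>
    simp only [List.foldl_cons]
    by_cases h : pvGet m nb.1 nb.2 < 0
    · obtain ⟨hr, hc⟩ := pvGet_neg_bounds h
      rw [show pvFlipStep (m, nq) nb
        = (pvSet m nb.1 nb.2 (pvGet m nb.1 nb.2 * -1), nq ++ [nb]) by simp [pvFlipStep, h]]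
      obtain ⟨ihS, ihV, ihM⟩ := ih (pvSet m nb.1 nb.2 (pvGet m nb.1 nb.2 * -1)) (nq ++ [nb])
      have hget : ∀ r c, pvGet (pvSet m nb.1 nb.2 (pvGet m nb.1 nb.2 * -1)) r c
          = if nb.1 = r ∧ nb.2 = c then pvGet m nb.1 nb.2 * -1 else pvGet m r c :=
        fun r c => pvGet_pvSet _ r c hr hc
      refine ⟨sameShape_trans ihS (sameShape_pvSet hr hc), fun r c => ?_, fun x => ?_⟩
      · rw [ihV r c, hget r c]
        by_cases heq : nb.1 = r ∧ nb.2 = c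
        · rw [if_pos heq, if_neg (by rintro ⟨hx, -⟩; omega), ← heq.1, ← heq.2,
            if_pos ⟨h, List.mem_cons_self ..⟩]
        · rw [if_neg heq]
          have hne : ((r, c) ∈ nb :: ns) ↔ ((r, c) ∈ ns) := by
            simp only [List.mem_cons]
            constructor
            · rintro (h2 | h2)
              · exact absurd ⟨congrArg Prod.fst h2.symm, congrArg Prod.snd h2.symm⟩ heq
              · exact h2
            · exact Or.inr
          simp only [hne]
      · rw [ihM x, hget x.1 x.2]
        by_cases heq : nb.1 = x.1 ∧ nb.2 = x.2
        · have hxnb : x = nb := Prod.ext heq.1.symm heq.2.symm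
          have hlt : pvGet m x.1 x.2 < 0 := by rw [hxnb]; exact h
          rw [if_pos heq]
          simp only [List.mem_append, List.mem_cons]
          tauto
        · have hxnb : x ≠ nb := fun hx => heq ⟨congrArg Prod.fst hx.symm, congrArg Prod.snd hx.symm⟩
          rw [if_neg heq]
          simp only [List.mem_append, List.mem_cons]
          tauto
    · rw [show pvFlipStep (m, nq) nb = (m, nq) by simp [pvFlipStep, h]]
      obtain ⟨ihS, ihV, ihM⟩ := ih m nq
      refine ⟨ihS, fun r c => ?_, fun x => ?_⟩
      · rw [ihV r c]
        by_cases heq : (r, c) = nb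
        · have : ¬ pvGet m r c < 0 := by rw [show r = nb.1 by rw [← heq], show c = nb.2 by rw [← heq]]; exact h
          rw [if_neg (by tauto), if_neg (by tauto)]
        · have hne : ((r, c) ∈ nb :: ns) ↔ ((r, c) ∈ ns) := by
            simp only [List.mem_cons]
            exact ⟨fun h2 => h2.resolve_left heq, Or.inr⟩
          simp only [hne]
      · rw [ihM x]
        by_cases heq : x = nb
        · have : ¬ pvGet m x.1 x.2 < 0 := by rw [heq]; exact h
          simp only [List.mem_cons]
          tauto
        · simp only [List.mem_cons]
          tauto

-- characterisation of A's inner while-loop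
theorem pvInner_char (q : List (Nat × Nat)) (m : List (List Int)) (nq : List (Nat × Nat)) :
    SameShape ((pvInner m q nq).1) m ∧
    (∀ r c, pvGet ((pvInner m q nq).1) r c
      = if FlipA m q (r, c) then pvGet m r c * -1 else pvGet m r c) ∧
    (∀ x, x ∈ (pvInner m q nq).2 ↔ x ∈ nq ∨ FlipA m q x) := by
  induction q generalizing m nq with
  | nil =>
    refine ⟨sameShape_refl m, fun r c => ?_, fun x => ?_⟩ <;>
      simp [FlipA, pvInner]
  | cons p q ih =>
    obtain ⟨pr, pc⟩ := p
    simp only [pvInner]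
    obtain ⟨fS, fV, fM⟩ := pvFoldFlip_char (get_neighbours m pr pc) m nq
    set st := (get_neighbours m pr pc).foldl pvFlipStep (m, nq) with hst
    obtain ⟨ihS, ihV, ihM⟩ := ih st.1 st.2
    have hnb : ∀ r c, get_neighbours st.1 r c = get_neighbours m r c :=
      fun r c => get_neighbours_shape fS r c
    have hflip : ∀ x, FlipA st.1 q x ↔ (pvGet m x.1 x.2 < 0 ∧
        ¬ ((x.1, x.2) ∈ get_neighbours m pr pc) ∧ ∃ p ∈ q, x ∈ get_neighbours m p.1 p.2) := by
      intro x
      unfold FlipA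
      simp only [hnb, fV x.1 x.2]
      constructor
      · rintro ⟨h1, h2⟩
        split_ifs at h1 with hcond
        · exact absurd h1 (by omega)
        · exact ⟨h1, fun hmem => hcond ⟨h1, hmem⟩, h2⟩
      · rintro ⟨h1, h2, h3⟩
        rw [if_neg (fun hc => h2 hc.2)]
        exact ⟨h1, h3⟩
    refine ⟨sameShape_trans ihS fS, fun r c => ?_, fun x => ?_⟩
    · rw [ihV r c]
      simp only [hflip]
      rw [fV r c]
      by_cases h1 : pvGet m r c < 0
      · by_cases h2 : (r, c) ∈ get_neighbours m pr pc
        · rw [if_neg (show ¬(pvGet m r c < 0 ∧ (r, c) ∉ get_neighbours m pr pc ∧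
              ∃ p ∈ q, (r, c) ∈ get_neighbours m p.1 p.2) by rintro ⟨-, hnm, -⟩; exact hnm h2),
            if_pos ⟨h1, h2⟩,
            if_pos (show FlipA m ((pr, pc) :: q) (r, c) from
              ⟨h1, (pr, pc), List.mem_cons_self .., h2⟩)]
        · by_cases h3 : ∃ p ∈ q, (r, c) ∈ get_neighbours m p.1 p.2
          · obtain ⟨p', hp', hm⟩ := h3
            rw [if_pos ⟨h1, h2, p', hp', hm⟩, if_neg (fun hx => h2 hx.2),
              if_pos (show FlipA m ((pr, pc) :: q) (r, c) from
                ⟨h1, p', List.mem_cons_of_mem _ hp', hm⟩)]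
          · rw [if_neg (fun hx => h3 hx.2.2), if_neg (fun hx => h2 hx.2),
              if_neg (show ¬ FlipA m ((pr, pc) :: q) (r, c) by
                rintro ⟨-, p', hp', hm⟩
                rcases List.mem_cons.1 hp' with rfl | hp'
                · exact h2 hm
                · exact h3 ⟨p', hp', hm⟩)]
      · rw [if_neg (fun hx => h1 hx.1), if_neg (fun hx => h1 hx.1),
          if_neg (show ¬ FlipA m ((pr, pc) :: q) (r, c) by rintro ⟨hx, -⟩; exact h1 hx)]
    · rw [ihM x, hflip x, fM x]
      unfold FlipA
      constructor
      · rintro ((h1 | ⟨h1, h2⟩) | ⟨h1, h2, h3⟩)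
        · exact Or.inl h1
        · exact Or.inr ⟨h1, (pr, pc), List.mem_cons_self .., h2⟩
        · obtain ⟨p', hp', hm⟩ := h3
          exact Or.inr ⟨h1, p', List.mem_cons_of_mem _ hp', hm⟩
      · rintro (h1 | ⟨h1, p', hp', hm⟩)
        · exact Or.inl (Or.inl h1)
        · rcases List.mem_cons.1 hp' with rfl | hp'
          · exact Or.inl (Or.inr ⟨h1, hm⟩)
          · by_cases h2 : (x.1, x.2) ∈ get_neighbours m pr pc
            · exact Or.inl (Or.inr ⟨h1, h2⟩)
            · exact Or.inr ⟨h1, h2, p', hp', hm⟩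

-- characterisation of B's flip application
theorem pvApplyFlips_char (fs : List (Nat × Nat)) (m : List (List Int))
    (hnd : fs.Nodup) (hneg : ∀ x ∈ fs, pvGet m x.1 x.2 < 0) :
    SameShape (pvApplyFlips m fs) m ∧
    (∀ r c, pvGet (pvApplyFlips m fs) r c
      = if (r, c) ∈ fs then pvGet m r c * -1 else pvGet m r c) := by
  induction fs generalizing m with
  | nil => exact ⟨sameShape_refl m, by simp [pvApplyFlips]⟩
  | cons y fs ih =>
    have hy := hneg y (List.mem_cons_self ..)
    obtain ⟨hr, hc⟩ := pvGet_neg_bounds hy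
    have hstep : (m.set y.1 ((m.getD y.1 []).set y.2 (-((m.getD y.1 []).getD y.2 0))))
        = pvSet m y.1 y.2 (-(pvGet m y.1 y.2)) := rfl
    simp only [pvApplyFlips, List.foldl_cons, hstep]
    have hget : ∀ r c, pvGet (pvSet m y.1 y.2 (-(pvGet m y.1 y.2))) r c
        = if y.1 = r ∧ y.2 = c then -(pvGet m y.1 y.2) else pvGet m r c :=
      fun r c => pvGet_pvSet _ r c hr hc
    obtain ⟨ihS, ihV⟩ := ih (pvSet m y.1 y.2 (-(pvGet m y.1 y.2))) (List.Nodup.of_cons hnd)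
      (by
        intro x hx
        have hxy : x ≠ y := fun h => (List.nodup_cons.1 hnd).1 (h ▸ hx)
        rw [hget x.1 x.2, if_neg (fun hc2 => hxy (Prod.ext hc2.1.symm hc2.2.symm))]
        exact hneg x (List.mem_cons_of_mem _ hx))
    refine ⟨sameShape_trans ihS (sameShape_pvSet hr hc), fun r c => ?_⟩
    have hiv := ihV r c
    unfold pvApplyFlips at hiv
    rw [hiv, hget r c]
    by_cases heq : y.1 = r ∧ y.2 = c
    · have hyrc : y = (r, c) := Prod.ext heq.1 heq.2
      have hnotfs : (r, c) ∉ fs := fun hm => (List.nodup_cons.1 hnd).1 (hyrc ▸ hm)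
      rw [if_neg hnotfs, if_pos (show (r, c) ∈ y :: fs by rw [hyrc]; exact List.mem_cons_self ..),
        heq.1, heq.2]
      omega
    · have hyrc : (r, c) ≠ y := fun h => heq ⟨congrArg Prod.fst h.symm, congrArg Prod.snd h.symm⟩
      rw [if_neg heq]
      simp only [List.mem_cons]
      simp only [show ((r, c) = y ∨ (r, c) ∈ fs) ↔ ((r, c) ∈ fs) by tauto]

-- A's flip set = B's flip set, given the invariant
theorem flipA_iff_flips {m : List (List Int)} {q : List (Nat × Nat)} {x : Nat × Nat}
    (hR : Rect m) (hI : QInv m q) :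
    FlipA m q x ↔ x ∈ pvFlips m := by
  rw [pvFlips_mem]
  constructor
  · rintro ⟨hneg, p, hp, hm⟩
    obtain ⟨hpin, hppos⟩ := hI.1 p hp
    obtain ⟨hxin, horth⟩ := (mem_get_neighbours hR hpin).1 hm
    refine ⟨hxin.1, hxin.2, hneg, ?_⟩
    rw [hasPos_iff]
    exact ⟨p, hpin, orth_symm.1 horth, hppos⟩
  · rintro ⟨h1, h2, h3, h4⟩
    obtain ⟨y, hyin, horth, hypos⟩ := hasPos_iff.1 h4
    have hyq : y ∈ q := hI.2 x y ⟨h1, h2⟩ h3 hyin horth hypos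
    exact ⟨h3, y, hyq, (mem_get_neighbours hR hyin).2 ⟨⟨h1, h2⟩, orth_symm.1 horth⟩⟩

-- the invariant survives one round
theorem inv_next {m m' : List (List Int)} {q q' : List (Nat × Nat)}
    (hR : Rect m) (hI : QInv m q) (hs : SameShape m' m)
    (hval : ∀ r c, pvGet m' r c = if FlipA m q (r, c) then pvGet m r c * -1 else pvGet m r c)
    (hq' : ∀ x, x ∈ q' ↔ FlipA m q x) : QInv m' q' := by
  constructor
  · intro p hp
    have hF := (hq' p).1 hp
    obtain ⟨h1, h2⟩ := pvGet_neg_bounds hF.1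
    refine ⟨⟨hs.1 ▸ h1, hs.2 p.1 ▸ h2⟩, ?_⟩
    rw [hval p.1 p.2, if_pos hF]
    have hlt : pvGet m p.1 p.2 < 0 := hF.1
    omega
  · intro x y hx hneg hy horth hpos
    have hxm : InB m x := ⟨hs.1 ▸ hx.1, hs.2 x.1 ▸ hx.2⟩
    have hym : InB m y := ⟨hs.1 ▸ hy.1, hs.2 y.1 ▸ hy.2⟩
    have hnegm : pvGet m x.1 x.2 < 0 ∧ ¬ FlipA m q x := by
      have hv := hval x.1 x.2
      by_cases hF : FlipA m q (x.1, x.2)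
      · rw [if_pos hF] at hv
        have hlt : pvGet m x.1 x.2 < 0 := hF.1
        omega
      · rw [if_neg hF] at hv
        exact ⟨by omega, hF⟩
    by_cases hFy : FlipA m q (y.1, y.2)
    · exact (hq' y).2 hFy
    · have hvy := hval y.1 y.2
      rw [if_neg hFy] at hvy
      have hposy : 0 < pvGet m y.1 y.2 := by omega
      have hyq : y ∈ q := hI.2 x y hxm hnegm.1 hym horth hposy
      exact absurd (⟨hnegm.1, y, hyq,
        (mem_get_neighbours hR hym).2 ⟨hxm, orth_symm.1 horth⟩⟩ : FlipA m q x) hnegm.2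

-- both loops stop together when this round flips nothing
theorem loops_stop {m : List (List Int)} {q : List (Nat × Nat)} {p : Int}
    (hR : Rect m) (hI : QInv m q) (hq : q ≠ []) (hfs : pvFlips m = []) :
    pvOuter m q p = p + 1 ∧ pvLoop m (p + 1) = p + 1 := by
  obtain ⟨iS, iV, iM⟩ := pvInner_char q m []
  have hst2 : (pvInner m q []).2 = [] := by
    rcases h2 : (pvInner m q []).2 with _ | ⟨x, l⟩
    · rfl
    · exfalso
      have hx : x ∈ (pvInner m q []).2 := by rw [h2]; exact List.mem_cons_self ..
      have hF := ((iM x).1 hx).resolve_left (by simp)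
      have hx2 : x ∈ pvFlips m := (flipA_iff_flips hR hI).1 hF
      rw [hfs] at hx2
      simp at hx2
  constructor
  · rw [pvOuter, if_neg hq, hst2, pvOuter, if_pos rfl]
  · rw [pvLoop, if_pos hfs]

theorem main_loop (n : Nat) : ∀ (m : List (List Int)) (q : List (Nat × Nat)) (p : Int),
    pvNegCount m ≤ n → Rect m → QInv m q → q ≠ [] →
      pvOuter m q p = pvLoop m (p + 1) := by
  induction n with
  | zero =>
    intro m q p hn hR hI hq
    have hfs : pvFlips m = [] := by
      rcases hx : pvFlips m with _ | ⟨x, l⟩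
      · rfl
      · exfalso
        have hxm : x ∈ pvFlips m := by rw [hx]; exact List.mem_cons_self ..
        have hneg := (pvFlips_mem.1 hxm).2.2.1
        have := pvNegCount_pvSet hneg (le_refl (0 : Int))
        omega
    obtain ⟨ha, hb⟩ := loops_stop hR hI hq hfs
    rw [ha, hb]
  | succ n ih =>
    intro m q p hn hR hI hq
    by_cases hfs : pvFlips m = []
    · obtain ⟨ha, hb⟩ := loops_stop hR hI hq hfs
      rw [ha, hb]
    · obtain ⟨iS, iV, iM⟩ := pvInner_char q m []
      have hmem : ∀ x, x ∈ (pvInner m q []).2 ↔ x ∈ pvFlips m := by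
        intro x
        rw [iM x]
        simp only [List.not_mem_nil, false_or]
        exact flipA_iff_flips hR hI
      obtain ⟨x0, hx0⟩ := List.exists_mem_of_ne_nil _ hfs
      have hst2ne : (pvInner m q []).2 ≠ [] := by
        intro h
        have hx := (hmem x0).2 hx0
        rw [h] at hx
        simp at hx
      have hnodup := pvFlips_nodup m
      have hnegf : ∀ x ∈ pvFlips m, pvGet m x.1 x.2 < 0 :=
        fun x hx => (pvFlips_mem.1 hx).2.2.1
      obtain ⟨aS, aV⟩ := pvApplyFlips_char (pvFlips m) m hnodup hnegf
      have hmeq : (pvInner m q []).1 = pvApplyFlips m (pvFlips m) := by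
        apply shape_ext (sameShape_trans iS (sameShape_symm aS))
        intro r c
        rw [iV r c, aV r c]
        by_cases hF : FlipA m q (r, c)
        · rw [if_pos hF, if_pos ((flipA_iff_flips hR hI).1 hF)]
        · rw [if_neg hF, if_neg (fun hm2 => hF ((flipA_iff_flips hR hI).2 hm2))]
      have hcount := pvApplyFlips_count (pvFlips m) m hnodup hnegf
      have hlen : (pvFlips m).length ≠ 0 := by simpa using hfs
      have hn' : pvNegCount ((pvInner m q []).1) ≤ n := by rw [hmeq]; omega
      have hR' : Rect (pvInner m q []).1 := rect_of_sameShape iS hR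
      have hI' : QInv (pvInner m q []).1 (pvInner m q []).2 :=
        inv_next hR hI iS iV (fun x => by rw [iM x]; simp)
      rw [pvOuter, if_neg hq,
        ih (pvInner m q []).1 (pvInner m q []).2 (p + 1) hn' hR' hI' hst2ne, hmeq]
      conv_rhs => rw [pvLoop]
      rw [if_neg hfs]

-- ===== VERDICT (by name: the statement is the Claim_ definition above) =====
theorem flip_negatives_spec : Claim_equal_flip_negatives := by
  intro matrix _hD hP
  unfold Spec_flip_negatives flip_negatives flip_negatives_alt
  by_cases hq : get_positive_positions matrix = []
  · have hany : ¬ (matrix.any (fun row => row.any (fun v => 0 < v)) = true) := by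
      intro h
      obtain ⟨x, hx1, hx2⟩ := (any_pos_iff matrix).1 h
      have hx3 : x ∈ get_positive_positions matrix := sources_mem.2 ⟨hx1, hx2⟩
      rw [hq] at hx3
      simp at hx3
    rw [hq, pvOuter, if_pos rfl, if_neg hany]
  · obtain ⟨x0, hx0⟩ := List.exists_mem_of_ne_nil _ hq
    obtain ⟨hx1, hx2⟩ := sources_mem.1 hx0
    rw [if_pos ((any_pos_iff matrix).2 ⟨x0, hx1, hx2⟩)]
    have hI : QInv matrix (get_positive_positions matrix) := by
      constructor
      · exact fun p hp => sources_mem.1 hp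
      · exact fun x y _ _ hy _ hpos => sources_mem.2 ⟨hy, hpos⟩
    have hmain := main_loop (pvNegCount matrix) matrix (get_positive_positions matrix) 0
      le_rfl (pre_rect hP) hI hq
    rw [hmain]
    norm_num
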